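-- pv_equiv track=rewrite | github.com/DannyLee1991/ai_qi | web/dataset_preproces/common.py | gen_nodelist
-- ===== SOURCE A (Python) =====
-- import math
--
-- def gen_nodelist(data, n):
--     '''
--     生成节点列表  节点是指示数据的分割点
--     :param data: 原始数据 需要被分割的数据
--     :param n: 分割的份数
--     :return:
--     '''
--     sorted_list = sorted(data)
--     size = len(sorted_list)
--     node_list = []
--     block_size = math.ceil(size / n)
--     for index, item in enumerate(sorted_list):
--         if (index + 1) % block_size == 0:
--             node_list.append(item)
--         elif index == 0:
--             node_list.append(item)
--         elif index == size - 1: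
--             node_list.append(item)
--
--     return node_list
-- ===== SOURCE B (Python) =====
-- import math
--
-- def gen_nodelist(data, n):
--     sorted_list = sorted(data)
--     step = abs(math.ceil(len(sorted_list) / n))
--     out = []
--     start = 0
--     while start < len(sorted_list):
--         chunk = sorted_list[start:start + step]
--         out.append(chunk[-1])
--         start += step
--     if step > 1 and len(sorted_list) > 1:
--         out.insert(0, sorted_list[0])
--     return out
-- ===== Notes on version B (the rewrite author's own statement) =====
-- stated objective: alternative
-- what changed: Instead of scanning every element and testing (index+1) % block_size per element, B walks the sorted list chunk by chunk (slicing out block_size elements at an advancing start index), collects each chunk's last element, and prepends the first element when it is not itself a chunk boundary.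
import Mathlib
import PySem

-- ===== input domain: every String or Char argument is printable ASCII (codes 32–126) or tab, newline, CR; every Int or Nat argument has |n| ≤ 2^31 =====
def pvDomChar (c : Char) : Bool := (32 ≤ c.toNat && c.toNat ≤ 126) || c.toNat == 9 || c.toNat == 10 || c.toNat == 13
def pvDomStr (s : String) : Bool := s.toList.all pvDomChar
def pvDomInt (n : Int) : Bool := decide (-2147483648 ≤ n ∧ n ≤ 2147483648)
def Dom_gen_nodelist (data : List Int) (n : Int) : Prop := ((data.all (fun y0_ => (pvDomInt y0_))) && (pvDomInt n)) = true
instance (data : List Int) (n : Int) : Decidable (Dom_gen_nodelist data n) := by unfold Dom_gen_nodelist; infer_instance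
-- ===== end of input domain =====

-- B replaces A's per-element modulo scan by a chunk walk: it slices block_size elements off the
-- sorted list at a time, keeps each chunk's last element, and prepends the first element when it
-- is not already a chunk boundary; alternative decomposition, similar cost.

-- ===== PORT A =====
def gen_nodelist (data : List Int) (n : Int) : List Int :=
  let sorted_list := PySem.List.sorted data (fun x => x)
  let size : Int := PySem.List.len sorted_list
  let node_list : List Int := []
  -- math.ceil(size / n) ported as exact integer ceiling division -((-size) // n);
  -- exact here: size and n are integers, so math.ceil(size/n) is this integer ceiling
  let block_size : Int := -(PySem.Int.floordiv (-size) n)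
  (PySem.List.enumerate sorted_list).foldl (fun acc p =>
    if PySem.Int.mod (p.1 + 1) block_size = 0 then acc ++ [p.2]
    else if p.1 = 0 then acc ++ [p.2]
    else if p.1 = size - 1 then acc ++ [p.2]
    else acc) node_list

-- ===== PORT B =====
-- Source B's while loop: walk the sorted list chunk by chunk via an advancing start index,
-- appending each chunk's last element. chunk[-1] on the nonempty chunk is its last element
-- (getLastD, exact here); the slice s[start:start+step] with nonnegative bounds is
-- (s.drop start).take step, exact here. When step = 0 with a nonempty list Python B raises
-- IndexError (chunk is empty) — those inputs lie outside Pre_; the 'step = 0 → out' branch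
-- is only a totality guard for that region.
def pvChunkLasts (s : List Int) (step start : Nat) (out : List Int) : List Int :=
  if start < s.length then
    if step = 0 then out
    else pvChunkLasts s step (start + step) (out ++ [((s.drop start).take step).getLastD 0])
  else out
  termination_by s.length - start
  decreasing_by omega

def gen_nodelist_alt (data : List Int) (n : Int) : List Int :=
  let sorted_list := PySem.List.sorted data (fun x => x)
  -- abs(math.ceil(len(sorted_list) / n)), same exact integer ceiling as in port A
  let step : Int := |(-(PySem.Int.floordiv (-(PySem.List.len sorted_list)) n))|
  let out := pvChunkLasts sorted_list step.toNat 0 []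
  -- sorted_list[0] → headD 0, exact: the guard forces sorted_list nonempty
  if 1 < step ∧ 1 < PySem.List.len sorted_list then sorted_list.headD 0 :: out else out

-- ===== PRECONDITION & SPEC =====
-- Pre_ excludes exactly the inputs where A raises: n = 0 (ZeroDivisionError in math.ceil(size/n)),
-- and nonempty data with n < -len(data), where block_size = 0 and '(index+1) % block_size' raises.
def Pre_gen_nodelist (data : List Int) (n : Int) : Prop :=
  n ≠ 0 ∧ (data = [] ∨ 0 ≤ (data.length : Int) + n)
instance (data : List Int) (n : Int) : Decidable (Pre_gen_nodelist data n) := by unfold Pre_gen_nodelist; infer_instance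
def pvWitness_gen_nodelist : List Int × Int := ([3, 1, 2, 7, 5], 2)

def Spec_gen_nodelist (data : List Int) (n : Int) (out : List Int) : Prop := out = gen_nodelist_alt data n
instance (data : List Int) (n : Int) (out : List Int) : Decidable (Spec_gen_nodelist data n out) := by unfold Spec_gen_nodelist; infer_instance

-- ===== CLAIM =====
def Claim_equal_gen_nodelist : Prop := ∀ (data : List Int) (n : Int), Dom_gen_nodelist data n → Pre_gen_nodelist data n → Spec_gen_nodelist data n (gen_nodelist data n)

-- ===== LEMMAS AND PROOFS =====

-- proof helper: the chunk walk as structural recursion on the remaining list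
def pvChunkRec : Nat → List Int → List Int
  | _, [] => []
  | 0, _ :: _ => []
  | (step+1), (x :: xs) =>
      ((x :: xs).take (step+1)).getLastD 0 :: pvChunkRec (step+1) ((x :: xs).drop (step+1))
  termination_by _ l => l.length
  decreasing_by simp

-- B's index-advancing loop equals the structural recursion on the dropped suffix
lemma chunkLasts_eq_rec (s : List Int) (k : Nat) : ∀ (m start : Nat) (out : List Int),
    s.length - start ≤ m →
    pvChunkLasts s (k+1) start out = out ++ pvChunkRec (k+1) (s.drop start) := by
  intro m
  induction m with
  | zero =>
    intro start out h
    rw [pvChunkLasts, if_neg (by omega)]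
    rw [List.drop_of_length_le (by omega)]
    simp [pvChunkRec]
  | succ m ih =>
    intro start out h
    by_cases hlt : start < s.length
    · rw [pvChunkLasts, if_pos hlt, if_neg (by omega)]
      rw [ih (start + (k+1)) _ (by omega)]
      obtain ⟨y, ys, hy⟩ : ∃ y ys, s.drop start = y :: ys := by
        have : s.drop start ≠ [] := by
          intro hnil
          have := congrArg List.length hnil
          simp at this
          omega
        exact List.exists_cons_of_ne_nil this
      have hdd : s.drop (start + (k+1)) = (s.drop start).drop (k+1) := by
        rw [List.drop_drop]
      rw [hdd, hy, pvChunkRec, ← hy]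
      simp
    · rw [pvChunkLasts, if_neg hlt]
      rw [List.drop_of_length_le (by omega)]
      simp [pvChunkRec]

-- A's scan-and-append loop is the filter of the enumerated list by its three-way condition.
lemma loop_eq (N b : Int) (l : List (Int × Int)) (acc : List Int) :
    l.foldl (fun acc p =>
      if PySem.Int.mod (p.1 + 1) b = 0 then acc ++ [p.2]
      else if p.1 = 0 then acc ++ [p.2]
      else if p.1 = N - 1 then acc ++ [p.2]
      else acc) acc
    = acc ++ (l.filter (fun p => decide (PySem.Int.mod (p.1 + 1) b = 0 ∨ p.1 = 0 ∨ p.1 = N - 1))).map Prod.snd := by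
  induction l generalizing acc with
  | nil => simp
  | cons x xs ih =>
    simp only [List.foldl_cons, List.filter_cons]
    by_cases h1 : PySem.Int.mod (x.1 + 1) b = 0
    · simp [h1, ih]
    · by_cases h2 : x.1 = 0
      · simp [h2, ih]
      · by_cases h3 : x.1 = N - 1
        · simp [h3, ih]
        · simp [h1, h2, h3, ih]

lemma getD_last (s : List Int) (_h : s ≠ []) : s.getLastD 0 = s.getD (s.length - 1) 0 := by
  rw [List.getLastD_eq_getLast?, List.getLast?_eq_getElem?, List.getD_eq_getElem?_getD]

lemma chunk_eq (step : Nat) (hstep : 1 ≤ step) (s : List Int) :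
    pvChunkRec step s
      = ((List.range s.length).filter
          (fun i => decide ((i+1) % step = 0 ∨ i+1 = s.length))).map (fun i => s.getD i 0) := by
  obtain ⟨k, rfl⟩ : ∃ k, step = k + 1 := ⟨step - 1, by omega⟩
  have main : ∀ (m : Nat) (s : List Int), s.length ≤ m →
      pvChunkRec (k+1) s
        = ((List.range s.length).filter
            (fun i => decide ((i+1) % (k+1) = 0 ∨ i+1 = s.length))).map (fun i => s.getD i 0) := by
    intro m
    induction m with
    | zero =>
      intro s hs
      have : s = [] := List.eq_nil_of_length_eq_zero (by omega)
      subst this; simp [pvChunkRec]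
    | succ m ih =>
      intro s hs
      match s with
      | [] => simp [pvChunkRec]
      | x :: xs =>
        rw [pvChunkRec]
        set s := x :: xs with hsdef
        have hn : s.length = xs.length + 1 := by simp [hsdef]
        by_cases hle : s.length ≤ k + 1
        · -- single (possibly partial) chunk
          have hdrop : s.drop (k+1) = [] := List.drop_eq_nil_of_le hle
          have htake : s.take (k+1) = s := List.take_of_length_le hle
          rw [hdrop, htake]
          have hfilter : (List.range s.length).filter
              (fun i => decide ((i+1) % (k+1) = 0 ∨ i+1 = s.length)) = [s.length - 1] := by
            rw [hn, List.range_succ, List.filter_append]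
            have h1 : (List.range xs.length).filter
                (fun i => decide ((i+1) % (k+1) = 0 ∨ i+1 = xs.length + 1)) = [] := by
              apply List.filter_eq_nil_iff.mpr
              intro i hi
              have hi' : i < xs.length := List.mem_range.mp hi
              have hmod : (i+1) % (k+1) = i+1 := Nat.mod_eq_of_lt (by omega)
              simp only [decide_eq_true_eq]
              rintro (h | h) <;> omega
            rw [h1]
            simp
          rw [hfilter]
          simp only [List.map_cons, List.map_nil, pvChunkRec]
          rw [getD_last s (by simp [hsdef])]
        · -- full first chunk plus the rest
          rw [Nat.not_le] at hle
          have hlen_drop : (s.drop (k+1)).length = s.length - (k+1) := by simp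
          have ihd := ih (s.drop (k+1)) (by omega)
          rw [ihd, hlen_drop]
          -- split the range at the first chunk boundary
          have hsplit : s.length = (k+1) + (s.length - (k+1)) := by omega
          rw [hsplit, List.range_add, List.filter_append, List.filter_map, List.map_append,
            List.map_map]
          -- first chunk contributes exactly index k
          have h1 : (List.range (k+1)).filter
              (fun i => decide ((i+1) % (k+1) = 0 ∨ i+1 = (k+1) + (s.length - (k+1)))) = [k] := by
            rw [List.range_succ, List.filter_append]
            have h2 : (List.range k).filter
                (fun i => decide ((i+1) % (k+1) = 0 ∨ i+1 = (k+1) + (s.length - (k+1)))) = [] := by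
              apply List.filter_eq_nil_iff.mpr
              intro i hi
              have hi' : i < k := List.mem_range.mp hi
              have hmod : (i+1) % (k+1) = i+1 := Nat.mod_eq_of_lt (by omega)
              simp only [decide_eq_true_eq]
              rintro (h | h) <;> omega
            rw [h2]
            simp [Nat.mod_self]
          rw [h1]
          -- shifted condition on the tail equals the condition for the dropped list
          have hcond : ((fun i => decide ((i+1) % (k+1) = 0 ∨ i+1 = (k+1) + (s.length - (k+1)))) ∘
              (fun j => (k+1) + j))
              = (fun j => decide ((j+1) % (k+1) = 0 ∨ j+1 = s.length - (k+1))) := by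
            funext j
            simp only [Function.comp_apply]
            apply decide_eq_decide.mpr
            have : (k+1) + j + 1 = (k+1) + (j+1) := by omega
            rw [this, Nat.add_mod_left]
            constructor
            · rintro (h | h)
              exacts [Or.inl h, Or.inr (by omega)]
            · rintro (h | h)
              exacts [Or.inl h, Or.inr (by omega)]
          rw [hcond]
          -- indexing past the first chunk is indexing the dropped list
          have hmaps : ((fun i => s.getD i 0) ∘ fun j => (k+1) + j)
              = (fun j => (s.drop (k+1)).getD j 0) := by
            funext j
            simp only [Function.comp_apply]
            rw [List.getD_eq_getElem?_getD, List.getD_eq_getElem?_getD, List.getElem?_drop]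
          have hnorm : (k+1) + (s.length - (k+1)) - (k+1) = s.length - (k+1) := by omega
          simp only [List.map_cons, List.map_nil]
          rw [hmaps, hnorm]
          -- head: last of the full first chunk is s[k]
          have hhead : (s.take (k+1)).getLastD 0 = s.getD k 0 := by
            rw [getD_last _ (by simp [hsdef])]
            rw [List.length_take]
            have : min (k+1) s.length = k+1 := by omega
            rw [this]
            simp only [Nat.add_sub_cancel]
            rw [List.getD_eq_getElem?_getD, List.getD_eq_getElem?_getD, List.getElem?_take]
            simp
          rw [hhead]
          rfl
  exact main s.length s le_rfl

lemma main_nat (step : Nat) (hstep : 1 ≤ step) (s : List Int) :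
    ((List.range s.length).filter
        (fun i => decide ((i+1) % step = 0 ∨ i = 0 ∨ i+1 = s.length))).map (fun i => s.getD i 0)
      = if 1 < step ∧ 1 < s.length then s.headD 0 :: pvChunkRec step s
        else pvChunkRec step s := by
  rw [chunk_eq step hstep]
  by_cases h1 : 1 < step ∧ 1 < s.length
  · rw [if_pos h1]
    obtain ⟨hs2, hl2⟩ := h1
    obtain ⟨m, hm⟩ : ∃ m, s.length = m + 2 := ⟨s.length - 2, by omega⟩
    have key : (List.range s.length).filter
          (fun i => decide ((i+1) % step = 0 ∨ i = 0 ∨ i+1 = s.length))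
        = 0 :: (List.range s.length).filter
          (fun i => decide ((i+1) % step = 0 ∨ i+1 = s.length)) := by
      have hsucc : ∃ m', s.length = m' + 1 := ⟨m + 1, by omega⟩
      obtain ⟨m', hm'⟩ := hsucc
      rw [hm', List.range_succ_eq_map]
      rw [List.filter_cons_of_pos (by simp)]
      rw [List.filter_cons_of_neg (by
        simp only [decide_eq_true_eq]
        rintro (h | h)
        · rw [Nat.mod_eq_of_lt (by omega)] at h; omega
        · omega)]
      rw [List.filter_map, List.filter_map]
      have hcond : ((fun i => decide ((i+1) % step = 0 ∨ i = 0 ∨ i+1 = m' + 1)) ∘ Nat.succ)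
          = ((fun i => decide ((i+1) % step = 0 ∨ i+1 = m' + 1)) ∘ Nat.succ) := by
        funext j
        simp only [Function.comp_apply]
        apply decide_eq_decide.mpr
        constructor
        · rintro (h | h | h)
          exacts [Or.inl h, absurd h (by omega), Or.inr h]
        · rintro (h | h)
          exacts [Or.inl h, Or.inr (Or.inr h)]
      rw [hcond]
    rw [key]
    simp only [List.map_cons]
    congr 1
    obtain ⟨a, t, rfl⟩ : ∃ a t, s = a :: t := by
      match s, hm with
      | a :: t, _ => exact ⟨a, t, rfl⟩
    rfl
  · rw [if_neg h1]
    congr 1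
    apply List.filter_congr
    intro i hi
    have hi' : i < s.length := List.mem_range.mp hi
    apply decide_eq_decide.mpr
    constructor
    · rintro (h | h | h)
      · exact Or.inl h
      · -- i = 0: either step = 1 (then (0+1) % step = 0) or length ≤ 1 (then i+1 = length)
        subst h
        rcases Nat.lt_or_ge 1 step with hs | hs
        · have : s.length ≤ 1 := by omega
          exact Or.inr (by omega)
        · left
          have : step = 1 := by omega
          simp [this]
      · exact Or.inr h
    · rintro (h | h)
      exacts [Or.inl h, Or.inr (Or.inr h)]

-- the two ports agree on any list s (instantiated with the common sorted list)
lemma body_eq (s : List Int) (n : Int) (hn : n ≠ 0) (h2 : s = [] ∨ 0 ≤ (s.length : Int) + n) :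
    (PySem.List.enumerate s).foldl (fun acc p =>
      if PySem.Int.mod (p.1 + 1) (-(PySem.Int.floordiv (-(PySem.List.len s)) n)) = 0 then acc ++ [p.2]
      else if p.1 = 0 then acc ++ [p.2]
      else if p.1 = PySem.List.len s - 1 then acc ++ [p.2]
      else acc) []
    = (if 1 < |(-(PySem.Int.floordiv (-(PySem.List.len s)) n))| ∧ 1 < PySem.List.len s
       then s.headD 0 :: pvChunkLasts s (|(-(PySem.Int.floordiv (-(PySem.List.len s)) n))|).toNat 0 []
       else pvChunkLasts s (|(-(PySem.Int.floordiv (-(PySem.List.len s)) n))|).toNat 0 []) := by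
  have hlen : PySem.List.len s = (s.length : Int) := by simp
  by_cases h0 : s = []
  · subst h0
    rw [if_neg (by rw [hlen]; simp)]
    simp [PySem.List.enumerate, pvChunkLasts]
  · have hNpos : 0 < PySem.List.len s := by
      rw [hlen]
      exact_mod_cast List.length_pos_iff.mpr h0
    set N : Int := PySem.List.len s with hN
    set b : Int := -(PySem.Int.floordiv (-N) n) with hbdef
    have hq := PySem.Int.floordiv_mul_add_mod (-N) n
    have hb : b ≠ 0 := by
      intro h
      have hq0 : PySem.Int.floordiv (-N) n = 0 := by omega
      rw [hq0, zero_mul, zero_add] at hq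
      rcases lt_or_gt_of_ne hn with hneg | hpos
      · have hm := (PySem.Int.mod_neg_bounds (-N) hneg).1
        have h2' : 0 ≤ N + n := by
          have := h2.resolve_left h0
          omega
        omega
      · have hm := PySem.Int.mod_nonneg (-N) hpos
        omega
    have e1 : ((|b|.toNat : Nat) : Int) = |b| := Int.toNat_of_nonneg (abs_nonneg b)
    have e2 : N = (s.length : Int) := hlen
    have hstep1 : 1 ≤ |b|.toNat := by
      have : b ≠ 0 := hb
      have habs : 0 < |b| := abs_pos.mpr hb
      omega
    obtain ⟨k, hk⟩ : ∃ k, |b|.toNat = k + 1 := ⟨|b|.toNat - 1, by omega⟩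
    have hloop : pvChunkLasts s |b|.toNat 0 [] = pvChunkRec |b|.toNat s := by
      rw [hk, chunkLasts_eq_rec s k s.length 0 [] (by omega)]
      simp
    rw [hloop]
    rw [loop_eq N b, PySem.List.enumerate_eq_map_pyRange s 0, List.filter_map, List.map_map]
    rw [PySem.List.pyRange_one 0 N, List.filter_map, List.map_map]
    have htn : (N - 0).toNat = s.length := by omega
    rw [htn]
    have hcond : (((fun p => decide (PySem.Int.mod (p.1 + 1) b = 0 ∨ p.1 = 0 ∨ p.1 = N - 1)) ∘
          (fun j => (j, PySem.List.pyGetD s j 0))) ∘ (fun k : Nat => 0 + (k : Int)))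
        = (fun i => decide ((i+1) % |b|.toNat = 0 ∨ i = 0 ∨ i+1 = s.length)) := by
      funext i
      simp only [Function.comp_apply]
      apply decide_eq_decide.mpr
      have hc : (0 : Int) + (i:Int) + 1 = ((i+1 : Nat) : Int) := by push_cast; ring
      have hmod : PySem.Int.mod (0 + (i:Int) + 1) b = 0 ↔ (i+1) % |b|.toNat = 0 :=
        calc PySem.Int.mod (0 + (i:Int) + 1) b = 0 ↔ b ∣ ((i+1 : Nat) : Int) := by
              rw [PySem.Int.mod_eq_zero_iff_dvd, hc]
          _ ↔ ((|b|.toNat : Nat) : Int) ∣ ((i+1 : Nat) : Int) := by rw [e1, abs_dvd]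
          _ ↔ |b|.toNat ∣ (i+1) := Int.natCast_dvd_natCast
          _ ↔ (i+1) % |b|.toNat = 0 := Nat.dvd_iff_mod_eq_zero
      rw [hmod]
      constructor
      · rintro (h | h | h)
        exacts [Or.inl h, Or.inr (Or.inl (by omega)), Or.inr (Or.inr (by omega))]
      · rintro (h | h | h)
        exacts [Or.inl h, Or.inr (Or.inl (by omega)), Or.inr (Or.inr (by omega))]
    have hmap : (((Prod.snd : Int × Int → Int) ∘
          (fun j => (j, PySem.List.pyGetD s j 0))) ∘ (fun k : Nat => 0 + (k : Int)))
        = (fun i : Nat => s.getD i 0) := by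
      funext i
      simp
    rw [hcond, hmap, List.nil_append, main_nat |b|.toNat hstep1 s]
    by_cases hc : 1 < |b|.toNat ∧ 1 < s.length
    · rw [if_pos hc, if_pos ⟨by omega, by omega⟩]
    · rw [if_neg hc, if_neg (by intro hcc; exact hc ⟨by omega, by omega⟩)]

-- ===== VERDICT =====
theorem gen_nodelist_spec : Claim_equal_gen_nodelist := by
  intro data n _hDom hPre
  unfold Spec_gen_nodelist
  obtain ⟨hn, h2⟩ := hPre
  show gen_nodelist data n = gen_nodelist_alt data n
  simp only [gen_nodelist, gen_nodelist_alt]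
  apply body_eq _ n hn
  have hl : (PySem.List.sorted data (fun x => x)).length = data.length :=
    (PySem.List.sorted_perm data (fun x => x) false).length_eq
  rcases h2 with h | h
  · left
    subst h
    exact List.eq_nil_of_length_eq_zero (by rw [hl]; rfl)
  · right
    rw [hl]; exact h
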